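-- pv_equiv track=rewrite | github.com/pypi-data/pypi-mirror-377 | packages/django-silque-notifications/django_silque_notifications-0.1.1-py3-none-any.whl/silque_notifications/services.py | validate_receiver_nos
-- ===== SOURCE A (Python) =====
-- def validate_receiver_nos(receiver_list):
--     validated_receiver_list = []
--     for receiver in receiver_list:
--         # remove invalid character
--         for x in [' ','-', '(', ')', '+']:
--             receiver = receiver.replace(x, '')
--
--         validated_receiver_list.append(receiver)
--
--     if not validated_receiver_list:
--         return None
--
--     return validated_receiver_list
-- ===== SOURCE B (Python) =====
-- BAD = {' ', '-', '(', ')', '+'}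
--
-- def validate_receiver_nos(receiver_list):
--     validated = [''.join(c for c in r if c not in BAD) for r in receiver_list]
--     return validated or None
-- ===== Notes on version B (the rewrite author's own statement) =====
-- stated objective: idiomatic
-- what changed: Replaces five sequential full-string .replace passes per receiver with a single set-membership filter over each string's characters, and builds the list by comprehension with an 'or None' guard.
import Mathlib
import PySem

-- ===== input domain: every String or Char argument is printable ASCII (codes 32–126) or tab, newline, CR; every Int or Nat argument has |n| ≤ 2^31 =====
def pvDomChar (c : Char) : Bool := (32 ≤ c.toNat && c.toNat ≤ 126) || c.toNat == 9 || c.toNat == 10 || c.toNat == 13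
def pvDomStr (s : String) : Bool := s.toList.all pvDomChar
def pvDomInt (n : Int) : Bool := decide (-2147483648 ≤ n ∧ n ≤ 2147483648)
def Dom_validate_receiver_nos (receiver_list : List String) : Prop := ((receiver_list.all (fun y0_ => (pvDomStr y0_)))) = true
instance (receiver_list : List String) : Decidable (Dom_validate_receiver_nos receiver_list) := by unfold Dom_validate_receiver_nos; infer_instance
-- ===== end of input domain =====

-- B replaces A's five sequential full-string .replace passes per receiver with one
-- set-membership filter over the characters (objective: idiomatic / single pass).

-- ===== PORT A =====
-- for receiver in receiver_list: for x in [' ','-','(',')','+']: receiver = receiver.replace(x,'')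
def validate_receiver_nos (receiver_list : List String) : Option (List String) :=
  let validated_receiver_list :=
    receiver_list.foldl (fun acc receiver =>
      let receiver := [" ", "-", "(", ")", "+"].foldl
        (fun r x => PySem.Str.replace r x "") receiver
      acc ++ [receiver]) []
  if validated_receiver_list.isEmpty then none else some validated_receiver_list

-- ===== PORT B =====
def pvBadChar (c : Char) : Bool := c == ' ' || c == '-' || c == '(' || c == ')' || c == '+'

def validate_receiver_nos_alt (receiver_list : List String) : Option (List String) :=
  let validated := receiver_list.map
    (fun r => String.ofList (r.toList.filter (fun c => !pvBadChar c)))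
  if validated = [] then none else some validated

-- ===== PRECONDITION & SPEC =====
def Spec_validate_receiver_nos (receiver_list : List String) (out : Option (List String)) : Prop := out = validate_receiver_nos_alt receiver_list
instance (receiver_list : List String) (out : Option (List String)) : Decidable (Spec_validate_receiver_nos receiver_list out) := by unfold Spec_validate_receiver_nos; infer_instance

-- ===== CLAIM (what is proved, stated in full; the proofs are below) =====
def Claim_equal_validate_receiver_nos : Prop := ∀ (receiver_list : List String), Dom_validate_receiver_nos receiver_list → Spec_validate_receiver_nos receiver_list (validate_receiver_nos receiver_list)

-- ===== LEMMAS AND PROOFS =====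

lemma go_single (b : Char) : ∀ (fuel : Nat) (l acc : List Char), l.length ≤ fuel →
    PySem.Chars.replace.go [b] [] fuel l acc = acc.reverse ++ l.filter (fun c => c != b) := by
  intro fuel
  induction fuel with
  | zero => intro l acc h; simp at h; simp [h, PySem.Chars.replace.go]
  | succ n ih =>
    intro l acc h
    cases l with
    | nil => simp [PySem.Chars.replace.go]
    | cons c t =>
      simp [PySem.Chars.replace.go, List.isPrefixOf]
      by_cases hc : c = b
      · simp [hc, ih t acc (by simpa using h)]
      · simp [hc, ih t (c :: acc) (by simpa using h), Ne.symm hc]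

lemma replace_single (s : List Char) (b : Char) :
    PySem.Chars.replace s [b] [] = s.filter (fun c => c != b) := by
  simp [PySem.Chars.replace, go_single b s.length s [] le_rfl, List.isEmpty]

-- the five sequential replaces on one receiver equal one filter by pvBadChar
lemma clean_eq (r : String) :
    [" ", "-", "(", ")", "+"].foldl (fun r x => PySem.Str.replace r x "") r
      = String.ofList (r.toList.filter (fun c => !pvBadChar c)) := by
  have e1 : (" " : String).toList = [' '] := rfl
  have e2 : ("-" : String).toList = ['-'] := rfl
  have e3 : ("(" : String).toList = ['('] := rfl
  have e4 : (")" : String).toList = [')'] := rfl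
  have e5 : ("+" : String).toList = ['+'] := rfl
  have e0 : ("" : String).toList = [] := rfl
  simp only [List.foldl, PySem.Str.replace, String.toList_ofList, e0, e1, e2, e3, e4, e5,
    replace_single, List.filter_filter]
  congr 1
  apply List.filter_congr
  intro c _
  simp only [pvBadChar, bne, Bool.not_or]
  cases h1 : c == ' ' <;> cases h2 : c == '-' <;> cases h3 : c == '(' <;>
    cases h4 : c == ')' <;> cases h5 : c == '+' <;> rfl

-- A's foldl-append accumulation is a map
lemma foldl_append_map (xs : List String) (acc : List String) :
    xs.foldl (fun acc receiver =>
      acc ++ [[" ", "-", "(", ")", "+"].foldl (fun r x => PySem.Str.replace r x "") receiver]) acc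
    = acc ++ xs.map (fun r => String.ofList (r.toList.filter (fun c => !pvBadChar c))) := by
  induction xs generalizing acc with
  | nil => simp
  | cons y ys ih => rw [List.foldl_cons, ih, clean_eq]; simp

-- ===== VERDICT (by name: the statement is the Claim_ definition above) =====
theorem validate_receiver_nos_spec : Claim_equal_validate_receiver_nos := by
  intro receiver_list _
  unfold Spec_validate_receiver_nos validate_receiver_nos validate_receiver_nos_alt
  simp only [foldl_append_map, List.nil_append, List.isEmpty_iff]
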